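-- pv_equiv track=rewrite | github.com/andreeviictor1/Exercicios-BeeCrownd | BEE 1789.py | nivel_velocidade
-- ===== SOURCE A (Python) =====
-- def nivel_velocidade(velocidades):
--     nivel_1 = 0
--     nivel_2 = 0
--     nivel_3 = 0
--
--     for velocidade in velocidades:
--         if velocidade < 10 :
--             nivel_1 += 1
--         elif velocidade < 20 :
--             nivel_2 += 1
--         else:
--             nivel_3 += 1
--
--     if nivel_3 > 0:
--         return 3
--     elif nivel_2 > 0:
--         return 2
--     else:
--         return 1
-- ===== SOURCE B (Python) =====
-- def nivel_velocidade(velocidades):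
--     if not velocidades:
--         return 1
--     m = max(velocidades)
--     if m >= 20:
--         return 3
--     if m >= 10:
--         return 2
--     return 1
-- ===== Notes on version B (the rewrite author's own statement) =====
-- stated objective: simpler
-- what changed: B replaces the three bucket counters and counter checks by a single max scan and a closed-form threshold branch on the maximum.
import Mathlib
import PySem

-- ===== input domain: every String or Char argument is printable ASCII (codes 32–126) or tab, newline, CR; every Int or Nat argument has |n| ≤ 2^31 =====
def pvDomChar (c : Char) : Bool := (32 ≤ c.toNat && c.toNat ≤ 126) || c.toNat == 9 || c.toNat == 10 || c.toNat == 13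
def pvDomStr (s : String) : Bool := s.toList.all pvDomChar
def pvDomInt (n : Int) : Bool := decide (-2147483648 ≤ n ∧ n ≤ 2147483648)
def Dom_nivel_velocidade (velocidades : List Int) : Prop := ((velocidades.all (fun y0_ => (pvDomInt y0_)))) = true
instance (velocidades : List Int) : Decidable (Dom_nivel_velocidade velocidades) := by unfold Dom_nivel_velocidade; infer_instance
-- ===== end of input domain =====

-- B replaces three bucket counters with a single max scan and a closed-form threshold branch (simpler).

-- ===== PORT A =====
-- fold over the same (nivel_1, nivel_2, nivel_3) state as A's loop
def nivel_velocidade (velocidades : List Int) : Int :=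
  let counts := velocidades.foldl
    (fun (s : Int × Int × Int) velocidade =>
      if velocidade < 10 then (s.1 + 1, s.2.1, s.2.2)
      else if velocidade < 20 then (s.1, s.2.1 + 1, s.2.2)
      else (s.1, s.2.1, s.2.2 + 1))
    (0, 0, 0)
  if counts.2.2 > 0 then 3
  else if counts.2.1 > 0 then 2
  else 1

-- ===== PORT B =====
def nivel_velocidade_alt (velocidades : List Int) : Int :=
  match velocidades with
  | [] => 1
  | v :: vs =>
    let m := vs.foldl max v   -- max(velocidades)
    if m ≥ 20 then 3
    else if m ≥ 10 then 2
    else 1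

-- ===== PRECONDITION & SPEC =====
def Spec_nivel_velocidade (velocidades : List Int) (out : Int) : Prop := out = nivel_velocidade_alt velocidades
instance (velocidades : List Int) (out : Int) : Decidable (Spec_nivel_velocidade velocidades out) := by unfold Spec_nivel_velocidade; infer_instance

-- ===== CLAIM (what is proved, stated in full; the proofs are below) =====
def Claim_equal_nivel_velocidade : Prop := ∀ (velocidades : List Int), Dom_nivel_velocidade velocidades → Spec_nivel_velocidade velocidades (nivel_velocidade velocidades)

-- ===== LEMMAS AND PROOFS =====

-- invariant: from any state, the counters after the fold relate to the running maximum
lemma counts_foldl_char (vs : List Int) (a b c : Int) :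
    let r := vs.foldl
      (fun (s : Int × Int × Int) velocidade =>
        if velocidade < 10 then (s.1 + 1, s.2.1, s.2.2)
        else if velocidade < 20 then (s.1, s.2.1 + 1, s.2.2)
        else (s.1, s.2.1, s.2.2 + 1))
      (a, b, c)
    (r.2.2 > c ↔ ∃ v ∈ vs, 20 ≤ v) ∧ (r.2.1 > b ↔ ∃ v ∈ vs, 10 ≤ v ∧ v < 20) ∧
    c ≤ r.2.2 ∧ b ≤ r.2.1 := by
  induction vs generalizing a b c with
  | nil => simp
  | cons x xs ih =>
    simp only [List.foldl_cons]
    split_ifs with h1 h2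
    · have h := ih (a+1) b c
      simp only [List.mem_cons]
      constructor
      · rw [h.1]; constructor
        · rintro ⟨v, hv, h20⟩; exact ⟨v, Or.inr hv, h20⟩
        · rintro ⟨v, hv | hv, h20⟩
          · omega
          · exact ⟨v, hv, h20⟩
      refine ⟨?_, h.2.2⟩
      rw [h.2.1]; constructor
      · rintro ⟨v, hv, hr⟩; exact ⟨v, Or.inr hv, hr⟩
      · rintro ⟨v, hv | hv, hr⟩
        · omega
        · exact ⟨v, hv, hr⟩
    · have h := ih a (b+1) c
      simp only [List.mem_cons]
      refine ⟨?_, ?_, h.2.2.1, by have := h.2.2.2; omega⟩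
      · rw [h.1]; constructor
        · rintro ⟨v, hv, h20⟩; exact ⟨v, Or.inr hv, h20⟩
        · rintro ⟨v, hv | hv, h20⟩
          · omega
          · exact ⟨v, hv, h20⟩
      · constructor
        · intro _; exact ⟨x, Or.inl rfl, by omega⟩
        · intro _; have := h.2.2.2; omega
    · have h := ih a b (c+1)
      simp only [List.mem_cons]
      refine ⟨?_, ?_, by have := h.2.2.1; omega, h.2.2.2⟩
      · constructor
        · intro _; exact ⟨x, Or.inl rfl, by omega⟩
        · intro _; have := h.2.2.1; omega
      · rw [h.2.1]; constructor
        · rintro ⟨v, hv, hr⟩; exact ⟨v, Or.inr hv, hr⟩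
        · rintro ⟨v, hv | hv, hr⟩
          · omega
          · exact ⟨v, hv, hr⟩

lemma max_foldl_spec (vs : List Int) (v : Int) :
    v ≤ vs.foldl max v ∧ ∀ t : Int, (t ≤ vs.foldl max v ↔ t ≤ v ∨ ∃ u ∈ vs, t ≤ u) := by
  induction vs generalizing v with
  | nil => simp
  | cons x xs ih =>
    simp only [List.foldl_cons, List.mem_cons]
    have h := ih (max v x)
    constructor
    · have := h.1; omega
    · intro t
      rw [h.2 t]
      constructor
      · rintro (ht | ⟨u, hu, htu⟩)
        · rcases le_max_iff.mp ht with h | h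
          · exact Or.inl h
          · exact Or.inr ⟨x, Or.inl rfl, h⟩
        · exact Or.inr ⟨u, Or.inr hu, htu⟩
      · rintro (ht | ⟨u, hu | hu, htu⟩)
        · exact Or.inl (le_max_of_le_left ht)
        · subst hu; exact Or.inl (le_max_of_le_right htu)
        · exact Or.inr ⟨u, hu, htu⟩

-- ===== VERDICT (by name: the statement is the Claim_ definition above) =====
theorem nivel_velocidade_spec : Claim_equal_nivel_velocidade := by
  intro velocidades _
  unfold Spec_nivel_velocidade nivel_velocidade nivel_velocidade_alt
  match velocidades with
  | [] => decide
  | v :: vs =>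
    have hc := counts_foldl_char (v :: vs) 0 0 0
    simp only at hc
    have hm := max_foldl_spec vs v
    have h20 : (20 : Int) ≤ vs.foldl max v ↔ ∃ u ∈ v :: vs, (20:Int) ≤ u := by
      rw [hm.2 20]; simp [List.mem_cons]
    have h10 : (10 : Int) ≤ vs.foldl max v ↔ ∃ u ∈ v :: vs, (10:Int) ≤ u := by
      rw [hm.2 10]; simp [List.mem_cons]
    simp only
    split_ifs with hA1 hB1 hB2 hA2 hB1' hB2' hB1'' hB2''
    all_goals try rfl
    all_goals exfalso
    · -- A found some v ≥ 20 but B's max < 20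
      have h := h20.mpr (hc.1.1 (by omega)); omega
    · have h := h20.mpr (hc.1.1 (by omega)); omega
    · -- B's max ≥ 20 but A counted no v ≥ 20
      have h := hc.1.2 (h20.mp (by omega)); omega
    · -- A counted some 10 ≤ v < 20 but B's max < 10
      obtain ⟨u, hu, h1, h2⟩ := hc.2.1.1 (by omega)
      have : (10:Int) ≤ vs.foldl max v := h10.mpr ⟨u, hu, h1⟩
      omega
    · have h := hc.1.2 (h20.mp (by omega)); omega
    · -- B's max in [10,20) but A counted nothing ≥ 10
      obtain ⟨u, hu, h1⟩ := h10.mp (by omega)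
      by_cases h2 : u < 20
      · have := hc.2.1.2 ⟨u, hu, h1, h2⟩; omega
      · have := hc.1.2 ⟨u, hu, by omega⟩; omega
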